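-- pv_equiv track=rewrite | github.com/dohoanggiahuy317/LeetCode | array/find-the-original-array-of-prefix-xor.py | findArray
-- ===== SOURCE A (Python) =====
-- from typing import List
--
-- def findArray(pref: List[int]) -> List[int]:
--     ans = []
--
--     ans.append(pref[0])
--     curr = ans[0]
--
--     for i in range(1, len(pref)):
--         ans.append(curr ^ pref[i])
--         curr = curr ^ ans[-1]
--
--     return ans
-- ===== SOURCE B (Python) =====
-- # B: divide-and-conquer — recover the two halves independently (the right half is
-- # seeded by the overlapping prefix value pref[m-1]) and concatenate; no running state.
-- from typing import List
--
-- def findArray(pref: List[int]) -> List[int]: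
--     n = len(pref)
--     if n <= 2:
--         if n == 2:
--             return [pref[0], pref[0] ^ pref[1]]
--         return [pref[0]]
--     m = (n + 1) // 2
--     return findArray(pref[:m]) + findArray(pref[m - 1:])[1:]
-- ===== Notes on version B (the rewrite author's own statement) =====
-- stated objective: alternative
-- what changed: B replaces A's single left-to-right loop threading a cumulative XOR accumulator by a divide-and-conquer recursion: it splits the prefix array at the midpoint, recovers each half independently (the right half recursed on pref[m-1:] so its overlapping head seeds it), and concatenates.
import Mathlib
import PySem

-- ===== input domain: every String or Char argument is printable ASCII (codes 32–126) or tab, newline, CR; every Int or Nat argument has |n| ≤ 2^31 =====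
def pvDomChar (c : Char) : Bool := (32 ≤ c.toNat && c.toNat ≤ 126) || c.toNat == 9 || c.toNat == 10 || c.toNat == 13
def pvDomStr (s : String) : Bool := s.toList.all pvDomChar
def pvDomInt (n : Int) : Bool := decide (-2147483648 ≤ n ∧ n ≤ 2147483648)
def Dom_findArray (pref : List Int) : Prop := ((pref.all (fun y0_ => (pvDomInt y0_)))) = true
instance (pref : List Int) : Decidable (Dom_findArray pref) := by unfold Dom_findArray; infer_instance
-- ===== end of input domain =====

-- B replaces A's accumulator loop by a divide-and-conquer recursion on the two halves (same result, different decomposition).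
-- ===== PORT A =====
def findArray (pref : List Int) : List Int :=
  let ans : List Int := [] ++ [PySem.List.pyGetD pref 0 0]   -- ans = []; ans.append(pref[0])
  let curr := PySem.List.pyGetD ans 0 0                      -- curr = ans[0]
  let st := (PySem.List.pyRange 1 (pref.length : Int) 1).foldl
    (fun (s : List Int × Int) i =>
      let a := s.1 ++ [PySem.Int.bxor s.2 (PySem.List.pyGetD pref i 0)]  -- ans.append(curr ^ pref[i])
      (a, PySem.Int.bxor s.2 (PySem.List.pyGetD a (-1) 0)))              -- curr = curr ^ ans[-1]
    (ans, curr)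
  st.1

-- ===== PORT B =====
-- fuel = the list's length bounds the recursion depth (totality guard only; never hit on the inputs reached)
def findArrayGo (fuel : Nat) (pref : List Int) : List Int :=
  match fuel with
  | 0 => []
  | fuel + 1 =>
    if pref.length ≤ 2 then
      if pref.length = 2 then
        [PySem.List.pyGetD pref 0 0,
         PySem.Int.bxor (PySem.List.pyGetD pref 0 0) (PySem.List.pyGetD pref 1 0)]
      else [PySem.List.pyGetD pref 0 0]
    else
      -- m = (n + 1) // 2, inlined at its two uses
      findArrayGo fuel (PySem.List.slice pref none (some (PySem.Int.floordiv ((pref.length : Int) + 1) 2))) ++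
        PySem.List.slice
          (findArrayGo fuel (PySem.List.slice pref
            (some (PySem.Int.floordiv ((pref.length : Int) + 1) 2 - 1)) none))
          (some 1) none

def findArray_alt (pref : List Int) : List Int :=
  findArrayGo pref.length pref

-- ===== PRECONDITION & SPEC =====
-- Pre_ excludes only the empty list, on which A (pref[0]) raises IndexError (B raises there too).
def Pre_findArray (pref : List Int) : Prop := pref ≠ []
instance (pref : List Int) : Decidable (Pre_findArray pref) := by unfold Pre_findArray; infer_instance
def pvWitness_findArray : List Int := [5, 2, 0, 3, 1]
def Spec_findArray (pref : List Int) (out : List Int) : Prop := out = findArray_alt pref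
instance (pref : List Int) (out : List Int) : Decidable (Spec_findArray pref out) := by unfold Spec_findArray; infer_instance

-- ===== CLAIM (what is proved, stated in full; the proofs are below) =====
def Claim_equal_findArray : Prop := ∀ (pref : List Int), Dom_findArray pref → Pre_findArray pref → Spec_findArray pref (findArray pref)

-- ===== LEMMAS AND PROOFS =====

theorem bxor_cancel (a b : Int) : PySem.Int.bxor a (PySem.Int.bxor a b) = b := by
  unfold PySem.Int.bxor
  split_ifs <;> simp_all <;> omega

-- the XOR-of-adjacent-pairs list: what both programs produce after the head
def adjXor (p : Int) (rest : List Int) : List Int :=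
  ((p :: rest).zip rest).map (fun ab => PySem.Int.bxor ab.1 ab.2)

theorem adjXor_nil (p : Int) : adjXor p [] = [] := rfl

theorem adjXor_cons (p q : Int) (t : List Int) :
    adjXor p (q :: t) = PySem.Int.bxor p q :: adjXor q t := by
  simp [adjXor]

theorem length_adjXor (p : Int) (rest : List Int) : (adjXor p rest).length = rest.length := by
  simp [adjXor]

theorem adjXor_getElem (p : Int) (rest : List Int) (k : Nat) (hk : k < rest.length) :
    (adjXor p rest)[k]'(by simp [length_adjXor, hk]) =
      PySem.Int.bxor ((p :: rest).getD k 0) (rest.getD k 0) := by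
  rw [List.getD_eq_getElem _ _ (show k < (p :: rest).length by simp [Nat.lt_succ_of_lt hk]),
      List.getD_eq_getElem _ _ hk]
  simp [adjXor, List.getElem_zip]

-- splitting the adjacent-XOR list anywhere: the right part is seeded by the last value before the cut
theorem adjXor_append (u : List Int) (p : Int) (v : List Int) :
    adjXor p (u ++ v) = adjXor p u ++ adjXor ((p :: u).getLastD 0) v := by
  induction u generalizing p with
  | nil => simp [adjXor_nil]
  | cons q t ih => simp [adjXor_cons, ih q]

-- loop invariant of A's fold: after the indices 1..k, ans is the head plus the
-- first k adjacent XORs and curr equals pref[k]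
theorem loop_inv (p : Int) (rest : List Int) (k : Nat) (hk : k ≤ rest.length) :
    (PySem.List.pyRange 1 ((k + 1 : Nat) : Int) 1).foldl
      (fun (s : List Int × Int) i =>
        let a := s.1 ++ [PySem.Int.bxor s.2 (PySem.List.pyGetD (p :: rest) i 0)]
        (a, PySem.Int.bxor s.2 (PySem.List.pyGetD a (-1) 0)))
      ([p], p)
    = (p :: (adjXor p rest).take k, (p :: rest).getD k 0) := by
  induction k with
  | zero => simp [PySem.List.pyRange]
  | succ k ih =>
    have hk' : k ≤ rest.length := Nat.le_of_succ_le hk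
    have hstep : ((k + 1 + 1 : Nat) : Int) = ((k + 1 : Nat) : Int) + 1 := by push_cast; ring
    rw [hstep, PySem.List.pyRange_one_succ_right (by exact_mod_cast Nat.succ_le_succ (Nat.zero_le k)),
        List.foldl_append, ih hk']
    have hkl : k < rest.length := hk
    simp only [List.foldl_cons, List.foldl_nil]
    have hget : PySem.List.pyGetD (p :: rest) ((k + 1 : Nat) : Int) 0 = rest.getD k 0 := by
      rw [PySem.List.pyGetD_natCast]; simp
    rw [hget, PySem.List.pyGetD_neg_one_append_singleton]
    have htake : (adjXor p rest).take (k + 1) =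
        (adjXor p rest).take k ++ [PySem.Int.bxor ((p :: rest).getD k 0) (rest.getD k 0)] := by
      rw [List.take_add_one, List.getElem?_eq_getElem (by simp [length_adjXor, hkl]),
          adjXor_getElem p rest k hkl]
      simp
    have hgd : (p :: rest).getD (k + 1) 0 = rest.getD k 0 := by simp
    rw [bxor_cancel, htake, hgd]
    simp

-- A's value on a nonempty list, in closed form
theorem findArray_eq (p : Int) (rest : List Int) :
    findArray (p :: rest) = p :: adjXor p rest := by
  unfold findArray
  simp only [List.nil_append, PySem.List.pyGetD_zero_cons, List.length_cons]
  have := loop_inv p rest rest.length (le_refl _)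
  rw [show ((rest.length + 1 : Nat) : Int) = ((rest.length : Nat) : Int) + 1 by push_cast; ring] at this
  push_cast at this ⊢
  rw [this]
  rw [List.take_of_length_le (by rw [length_adjXor])]

-- the last element of xs[:k] is xs[k-1]
theorem getLastD_take (rest : List Int) (k : Nat) (d : Int) (h1 : 1 ≤ k)
    (h2 : k ≤ rest.length) :
    (rest.take k).getLastD d = rest.getD (k - 1) 0 := by
  induction rest generalizing k d with
  | nil => simp at h2; omega
  | cons a t ih =>
    rcases Nat.lt_or_ge k 2 with hlt | hge
    · have hke : k = 1 := by omega
      subst hke; simp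
    · rw [show k = (k - 1) + 1 by omega, List.take_succ_cons, List.getLastD_cons,
          ih (k - 1) a (by omega) (by simp at h2 ⊢; omega)]
      rw [show k - 1 + 1 - 1 = (k - 2) + 1 by omega, show k - 1 - 1 = k - 2 by omega,
          List.getD_cons_succ]

-- B's recursion in the same closed form (induction on the fuel)
theorem findArrayGo_eq : ∀ (fuel : Nat) (p : Int) (rest : List Int), rest.length < fuel →
    findArrayGo fuel (p :: rest) = p :: adjXor p rest := by
  intro fuel
  induction fuel with
  | zero => intro p rest h; omega
  | succ f ihf =>
    intro p rest hfuel
    cases rest with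
    | nil =>
      rw [findArrayGo]
      norm_num [adjXor_nil, PySem.List.pyGetD, PySem.List.pyGet?, PySem.List.pyIdx?]
    | cons b t =>
      cases t with
      | nil =>
        rw [findArrayGo]
        norm_num [adjXor_cons, adjXor_nil, PySem.List.pyGetD, PySem.List.pyGet?,
          PySem.List.pyIdx?]
      | cons c u =>
        -- the list is p :: b :: c :: u, length ≥ 3: the recursive branch
        rw [findArrayGo, if_neg (by simp)]
        have hmval : PySem.Int.floordiv (((p :: b :: c :: u).length : Int) + 1) 2
            = (((u.length + 4) / 2 : Nat) : Int) := by
          rw [show (((p :: b :: c :: u).length : Int) + 1) = ((u.length + 4 : Nat) : Int) by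
            simp; ring]
          exact PySem.Int.floordiv_natCast (u.length + 4) 2
        obtain ⟨k, hk⟩ : ∃ k : Nat, (u.length + 4) / 2 = k + 1 :=
          ⟨(u.length + 4) / 2 - 1, by omega⟩
        have hk1 : 1 ≤ k := by omega
        have hku : k ≤ u.length + 1 := by omega
        have hkle : k ≤ (b :: c :: u).length := by simp; omega
        have hklt : k - 1 < (b :: c :: u).length := by simp; omega
        rw [hmval, hk]
        rw [PySem.List.slice_to_natCast, List.take_succ_cons]
        rw [show (((k + 1 : Nat) : Int)) - 1 = ((k : Nat) : Int) by push_cast; ring]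
        rw [PySem.List.slice_from_natCast]
        rw [show (p :: b :: c :: u).drop k = (b :: c :: u).drop (k - 1) by
          conv_lhs => rw [show k = (k - 1) + 1 by omega]
          rw [List.drop_succ_cons]]
        rw [List.drop_eq_getElem_cons hklt]
        simp only [show k - 1 + 1 = k from by omega]
        have hlenfuel : (b :: c :: u).length < f + 1 := hfuel
        rw [ihf p (List.take k (b :: c :: u)) (by simp at hlenfuel ⊢; omega),
            ihf _ (List.drop k (b :: c :: u)) (by simp at hlenfuel ⊢; omega)]
        rw [PySem.List.slice_from_one, List.tail_cons]
        have hsplit := adjXor_append (List.take k (b :: c :: u)) p (List.drop k (b :: c :: u))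
        rw [List.take_append_drop] at hsplit
        rw [hsplit, List.getLastD_cons, getLastD_take (b :: c :: u) k p hk1 hkle]
        rw [List.getD_eq_getElem _ _ hklt]
        simp

theorem findArray_alt_eq (p : Int) (rest : List Int) :
    findArray_alt (p :: rest) = p :: adjXor p rest := by
  unfold findArray_alt
  exact findArrayGo_eq (p :: rest).length p rest (by simp)

-- ===== VERDICT (by name: the statement is the Claim_ definition above) =====
theorem findArray_spec : Claim_equal_findArray := by
  intro pref _ hpre
  cases pref with
  | nil => exact absurd rfl hpre
  | cons p rest =>
    show findArray (p :: rest) = findArray_alt (p :: rest)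
    rw [findArray_eq, findArray_alt_eq]
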